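-- pv_equiv track=rewrite | github.com/real-yfprojects/ectec | python/ectec-gui/dodo.py | generate_file_list
-- ===== SOURCE A (Python) =====
-- def generate_file_list(name: str,
--                        elements: list,
--                        center: int,
--                        line_max: int = 79) -> str:
--     """
--     Generate the assignment of a list to a variable inside a project file.
--
--     Parameters
--     ----------
--     name : str
--         The name of the variable.
--     elements : list
--         The list of elements.
--     center : int
--         The center of the statement where the equalsign is placed.
--     line_max : int, optional
--         The maximum line length, by default 79.
--
--     Returns
--     -------
--     str
--         The statement that can be written into the project file.
--     """
--     content = str(name) + " " * (center - len(name)) + '='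
--
--     # Make str list of elements
--     line = ''
--     first_line = True
--
--     end_of_line = line_max - (center + 1)  # The length for the code lines
--     elements = list(elements)
--     while elements:
--         element = str(elements.pop())
--         if len(line) + len(element) > end_of_line:
--             if not first_line:
--                 # new line
--                 content += ' \\\n'
--
--                 # indent line
--                 content += (center + 1) * ' '
--
--             first_line = False
--
--             # add code of line
--             content += line
--
--             line = ''
--
--         line += ' ' + element
--
--     if not first_line:
--         # new line
--         content += ' \\\n'
--
--         # indent line
--         content += (center + 1) * ' '
--
--     first_line = False
--
--     # add code of line
--     content += line
--
--     line = ''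
--
--     content += '\n'
--
--     return content
-- ===== SOURCE B (Python) =====
-- def generate_file_list(name: str,
--                        elements: list,
--                        center: int,
--                        line_max: int = 79) -> str:
--     """Arithmetic line-breaking: compute break indices from prefix sums of
--     element widths, then materialize each line by slicing and joining."""
--     strs = [str(e) for e in elements]
--     strs.reverse()
--     end_of_line = line_max - (center + 1)
--     # prefix sums of widths (each element occupies len + 1 for its leading space)
--     pre = [0]
--     total = 0
--     for s in strs:
--         total += len(s) + 1
--         pre.append(total)
--     # element k starts a new line iff the line holding it would exceed end_of_line
--     cuts = [0]
--     base = 0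
--     for k in range(len(strs)):
--         if pre[k + 1] - base - 1 > end_of_line:
--             cuts.append(k)
--             base = pre[k]
--     cuts.append(len(strs))
--     segs = [strs[i:j] for i, j in zip(cuts, cuts[1:])]
--     sep = ' \\\n' + (center + 1) * ' '
--     body = sep.join(' ' + ' '.join(seg) if seg else '' for seg in segs)
--     return str(name) + (center - len(name)) * ' ' + '=' + body + '\n'
-- ===== Notes on version B (the rewrite author's own statement) =====
-- stated objective: alternative
-- what changed: B replaces A's string-accumulating loop (with its first_line flag and interleaved separator appends) by an arithmetic line-breaking pass: it precomputes prefix sums of element widths, derives the break indices by comparing prefix-sum differences against the line budget (no string is touched during that scan), and then materializes the result in one shot by slicing the element list at the cuts and joining.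
import Mathlib
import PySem

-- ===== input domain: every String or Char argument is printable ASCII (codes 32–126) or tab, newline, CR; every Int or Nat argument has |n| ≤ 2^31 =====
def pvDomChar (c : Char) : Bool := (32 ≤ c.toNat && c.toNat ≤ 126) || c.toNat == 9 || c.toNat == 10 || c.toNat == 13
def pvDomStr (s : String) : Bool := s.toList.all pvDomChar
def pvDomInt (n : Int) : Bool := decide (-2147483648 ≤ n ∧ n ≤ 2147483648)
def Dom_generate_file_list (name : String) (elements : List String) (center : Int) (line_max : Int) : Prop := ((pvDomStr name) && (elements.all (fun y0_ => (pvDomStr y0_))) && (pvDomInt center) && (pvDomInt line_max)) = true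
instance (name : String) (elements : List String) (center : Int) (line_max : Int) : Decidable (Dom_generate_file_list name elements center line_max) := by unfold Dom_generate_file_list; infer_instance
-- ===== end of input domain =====

-- ===== PORT A =====
-- B breaks lines arithmetically on prefix sums of widths, then slices and joins; objective: alternative algorithm, same cost.
-- pySpaces n = Python's ' ' * n (empty for n <= 0; Int.toNat clamps exactly as Python's * does)
def pySpaces (n : Int) : String := String.ofList (List.replicate n.toNat ' ')

-- the while loop: elements.pop() takes from the end, so the loop consumes elements.reverse head-first
def gflLoopA (center eol : Int) : List String → String → String → Bool → String × String × Bool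
  | [], content, line, first => (content, line, first)
  | element :: rest, content, line, first =>
    if PySem.Str.len line + PySem.Str.len element > eol then
      let content := if !first then content ++ " \\\n" ++ pySpaces (center + 1) else content
      gflLoopA center eol rest (content ++ line) ("" ++ " " ++ element) false
    else
      gflLoopA center eol rest content (line ++ " " ++ element) first

def generate_file_list (name : String) (elements : List String) (center : Int) (line_max : Int) : String :=
  let content := name ++ pySpaces (center - PySem.Str.len name) ++ "="
  let eol := line_max - (center + 1)
  let r := gflLoopA center eol elements.reverse content "" true
  (((if !r.2.2 then r.1 ++ " \\\n" ++ pySpaces (center + 1) else r.1) ++ r.2.1) ++ "\n")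

-- ===== PORT B =====
-- ' ' + ' '.join(seg) if seg else ''
def renderSeg (seg : List String) : String := if seg.isEmpty then "" else " " ++ PySem.Str.join " " seg

-- pre = [0]; total = 0; for s in strs: total += len(s)+1; pre.append(total)
def gflPre (strs : List String) : List Int :=
  (strs.foldl (fun st s => (st.1 ++ [st.2 + PySem.Str.len s + 1], st.2 + PySem.Str.len s + 1))
    (([(0 : Int)] : List Int), (0 : Int))).1

-- for k in range(len(strs)): if pre[k+1]-base-1 > eol: cuts.append(k); base = pre[k]
-- (pre[j] is always in range here, so xs[j] is .getD j 0)
def cutsGo (eol : Int) (pre : List Int) : List Nat → List Nat × Int → List Nat × Int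
  | [], st => st
  | k :: ks, st =>
    if pre.getD (k + 1) 0 - st.2 - 1 > eol then cutsGo eol pre ks (st.1 ++ [k], pre.getD k 0)
    else cutsGo eol pre ks st

def generate_file_list_alt (name : String) (elements : List String) (center : Int) (line_max : Int) : String :=
  let strs := elements.reverse            -- str(e) is the identity on strings
  let eol := line_max - (center + 1)
  let pre := gflPre strs
  let cuts := (cutsGo eol pre (List.range strs.length) ([0], 0)).1 ++ [strs.length]
  -- strs[i:j] with 0 ≤ i, j ≤ len(strs) is drop i |>.take (j-i)
  let segs := (cuts.zip cuts.tail).map (fun p => (strs.drop p.1).take (p.2 - p.1))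
  let sep := " \\\n" ++ pySpaces (center + 1)
  name ++ pySpaces (center - PySem.Str.len name) ++ "=" ++ PySem.Str.join sep (segs.map renderSeg) ++ "\n"

-- ===== PRECONDITION & SPEC =====
def Spec_generate_file_list (name : String) (elements : List String) (center : Int) (line_max : Int) (out : String) : Prop := out = generate_file_list_alt name elements center line_max
instance (name : String) (elements : List String) (center : Int) (line_max : Int) (out : String) : Decidable (Spec_generate_file_list name elements center line_max out) := by unfold Spec_generate_file_list; infer_instance

-- ===== CLAIM (what is proved, stated in full; the proofs are below) =====
def Claim_equal_generate_file_list : Prop := ∀ (name : String) (elements : List String) (center : Int) (line_max : Int), Dom_generate_file_list name elements center line_max → Spec_generate_file_list name elements center line_max (generate_file_list name elements center line_max)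

-- ===== LEMMAS AND PROOFS =====

-- proof-only intermediary: the grouping loop (lines list + current line), sitting between A's flag loop and B's cut scan
def gflLoopB (eol : Int) : List String → List String → String → List String × String
  | [], lines, line => (lines, line)
  | element :: rest, lines, line =>
    if PySem.Str.len line + PySem.Str.len element > eol then
      gflLoopB eol rest (lines ++ [line]) ("" ++ " " ++ element)
    else
      gflLoopB eol rest lines (line ++ " " ++ element)

def sliceSeg (strs : List String) (i k : Nat) : List String := (strs.drop i).take (k - i)
def lineStr (strs : List String) (i k : Nat) : String :=
  (sliceSeg strs i k).foldl (fun a e => a ++ " " ++ e) ""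
def preVal (strs : List String) (k : Nat) : Int := ((strs.take k).map (fun s => PySem.Str.len s + 1)).sum

def presums (t : Int) : List String → List Int
  | [] => []
  | s :: r => (t + PySem.Str.len s + 1) :: presums (t + PySem.Str.len s + 1) r

def pairsOf : List Nat → List (Nat × Nat)
  | [] => []
  | [_] => []
  | a :: b :: r => (a, b) :: pairsOf (b :: r)

theorem join_snoc (sep : String) (xs : List String) (x : String) :
    PySem.Str.join sep (xs ++ [x]) = (if xs = [] then x else PySem.Str.join sep xs ++ sep ++ x) := by
  induction xs with
  | nil => simp [PySem.Str.join, PySem.Chars.join_singleton]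
  | cons h t ih =>
    cases t with
    | nil =>
      simp only [List.nil_append, List.cons_append, List.map_cons, List.map_nil, PySem.Str.join,
        PySem.Chars.join_cons_cons, PySem.Chars.join_singleton, if_neg (List.cons_ne_nil h [])]
      simp [String.ofList_append, String.append_assoc]
    | cons h2 t2 =>
      simp only [List.cons_append, List.map_cons, PySem.Str.join, PySem.Chars.join_cons_cons,
        if_neg (List.cons_ne_nil h2 t2), if_neg (List.cons_ne_nil h (h2 :: t2)),
        String.ofList_append, String.ofList_toList] at *
      rw [ih]
      simp [String.append_assoc]

-- flushing A's accumulated content equals joining the grouped lines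
theorem flush_eq (center : Int) (header line : String) (lines : List String) :
    (if !lines.isEmpty then (header ++ PySem.Str.join (" \\\n" ++ pySpaces (center + 1)) lines) ++ " \\\n" ++ pySpaces (center + 1) else header ++ PySem.Str.join (" \\\n" ++ pySpaces (center + 1)) lines) ++ line
      = header ++ PySem.Str.join (" \\\n" ++ pySpaces (center + 1)) (lines ++ [line]) := by
  rw [join_snoc]
  by_cases h : lines = []
  · subst h; simp [PySem.Str.join, PySem.Chars.join_nil]
  · have he : lines.isEmpty = false := by simp [h]
    simp [he, h, String.append_assoc]

-- A's flag loop computes the join of gflLoopB's grouped lines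
theorem loop_rel (center eol : Int) (header : String) (rev : List String) :
    ∀ (lines : List String) (line : String),
      (let r := gflLoopA center eol rev (header ++ PySem.Str.join (" \\\n" ++ pySpaces (center + 1)) lines) line lines.isEmpty
       (((if !r.2.2 then r.1 ++ " \\\n" ++ pySpaces (center + 1) else r.1) ++ r.2.1) ++ "\n"))
      = (let s := gflLoopB eol rev lines line
         header ++ PySem.Str.join (" \\\n" ++ pySpaces (center + 1)) (s.1 ++ [s.2]) ++ "\n") := by
  induction rev with
  | nil =>
    intro lines line
    simp only [gflLoopA, gflLoopB]
    rw [flush_eq]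
  | cons e rest ih =>
    intro lines line
    simp only [gflLoopA, gflLoopB]
    by_cases hc : PySem.Str.len line + PySem.Str.len e > eol
    · rw [if_pos hc, if_pos hc, flush_eq]
      have h2 := ih (lines ++ [line]) ("" ++ " " ++ e)
      rw [show (lines ++ [line]).isEmpty = false from by simp] at h2
      exact h2
    · rw [if_neg hc, if_neg hc]
      exact ih lines (line ++ " " ++ e)

-- the fold in gflPre builds [0] followed by the running prefix sums
theorem foldl_build : ∀ (l : List String) (p : List Int) (t : Int),
    (l.foldl (fun st s => (st.1 ++ [st.2 + PySem.Str.len s + 1], st.2 + PySem.Str.len s + 1)) (p, t)).1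
      = p ++ presums t l := by
  intro l
  induction l with
  | nil => intro p t; simp [presums]
  | cons s r ih =>
    intro p t
    simp only [List.foldl_cons, presums]
    rw [ih]
    simp

theorem length_presums : ∀ (l : List String) (t : Int), (presums t l).length = l.length := by
  intro l
  induction l with
  | nil => intro t; simp [presums]
  | cons s r ih => intro t; simp [presums, ih]

theorem getD_presums : ∀ (l : List String) (t : Int) (j : Nat), j < l.length →
    (presums t l).getD j 0 = t + preVal l (j + 1) := by
  intro l
  induction l with
  | nil => intro t j h; simp at h
  | cons s r ih =>
    intro t j h
    cases j with
    | zero => simp [presums, preVal]; ring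
    | succ j =>
      have hj : j < r.length := by simpa using h
      simp only [presums, List.getD_cons_succ]
      rw [ih (t + PySem.Str.len s + 1) j hj]
      simp only [preVal, List.take_succ_cons, List.map_cons, List.sum_cons]
      ring

theorem pre_getD (strs : List String) (k : Nat) (h : k ≤ strs.length) :
    (gflPre strs).getD k 0 = preVal strs k := by
  unfold gflPre
  rw [foldl_build]
  cases k with
  | zero => simp [preVal]
  | succ j =>
    have hj : j < strs.length := by omega
    have hlen : j < (presums 0 strs).length := by rw [length_presums]; exact hj
    simp only [List.singleton_append, List.getD_cons_succ]
    rw [getD_presums strs 0 j hj]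
    simp

theorem preVal_succ (strs : List String) (k : Nat) (h : k < strs.length) :
    preVal strs (k + 1) = preVal strs k + PySem.Str.len strs[k] + 1 := by
  unfold preVal
  rw [List.take_add_one, List.getElem?_eq_getElem h]
  simp only [Option.toList_some, List.map_append, List.sum_append, List.map_cons,
    List.map_nil, List.sum_cons, List.sum_nil]
  ring

theorem sliceSnoc (strs : List String) (i k : Nat) (hik : i ≤ k) (h : k < strs.length) :
    sliceSeg strs i (k + 1) = sliceSeg strs i k ++ [strs[k]] := by
  unfold sliceSeg
  have h1 : k + 1 - i = (k - i) + 1 := by omega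
  rw [h1, List.take_add_one]
  have h2 : (strs.drop i)[k - i]? = strs[k]? := by
    rw [List.getElem?_drop]
    congr 1
    omega
  rw [h2, List.getElem?_eq_getElem h]
  rfl

theorem lineStr_self (strs : List String) (i : Nat) : lineStr strs i i = "" := by
  simp [lineStr, sliceSeg]

theorem line_snoc (strs : List String) (i k : Nat) (hik : i ≤ k) (h : k < strs.length) :
    lineStr strs i (k + 1) = lineStr strs i k ++ " " ++ strs[k] := by
  unfold lineStr
  rw [sliceSnoc strs i k hik h, List.foldl_append]
  rfl

theorem lineStr_single (strs : List String) (k : Nat) (h : k < strs.length) :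
    lineStr strs k (k + 1) = "" ++ " " ++ strs[k] := by
  rw [line_snoc strs k k (le_refl k) h, lineStr_self]

theorem len_lineStr (strs : List String) (i : Nat) :
    ∀ k, i ≤ k → k ≤ strs.length →
      PySem.Str.len (lineStr strs i k) = preVal strs k - preVal strs i := by
  intro k
  induction k with
  | zero =>
    intro h1 _
    have : i = 0 := by omega
    subst this
    rw [lineStr_self]
    simp
  | succ k ih =>
    intro h1 h2
    by_cases hik : i = k + 1
    · subst hik
      rw [lineStr_self]
      simp
    · have hik' : i ≤ k := by omega
      have hk : k < strs.length := by omega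
      rw [line_snoc strs i k hik' hk, PySem.Str.len_append, PySem.Str.len_append,
        ih hik' (by omega), preVal_succ strs k hk]
      have : PySem.Str.len " " = 1 := by decide
      rw [this]
      ring

theorem pairs_zip : ∀ (xs : List Nat), xs.zip xs.tail = pairsOf xs := by
  intro xs
  induction xs with
  | nil => rfl
  | cons a t ih =>
    cases t with
    | nil => rfl
    | cons b r =>
      simp only [pairsOf, List.tail_cons, List.zip_cons_cons]
      rw [← ih]
      rfl

theorem pairs_snoc : ∀ (cs : List Nat) (i x : Nat),
    pairsOf ((cs ++ [i]) ++ [x]) = pairsOf (cs ++ [i]) ++ [(i, x)] := by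
  intro cs
  induction cs with
  | nil => intro i x; rfl
  | cons a cs ih =>
    intro i x
    obtain ⟨b, r, hb⟩ : ∃ b r, cs ++ [i] = b :: r := by
      cases cs with
      | nil => exact ⟨i, [], rfl⟩
      | cons c cs' => exact ⟨c, cs' ++ [i], rfl⟩
    have h1 : ((a :: cs) ++ [i]) ++ [x] = a :: b :: (r ++ [x]) := by simp [hb]
    have h2 : (a :: cs) ++ [i] = a :: b :: r := by simp [hb]
    rw [h1, h2]
    show (a, b) :: pairsOf (b :: (r ++ [x])) = ((a, b) :: pairsOf (b :: r)) ++ [(i, x)]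
    have h3 : b :: (r ++ [x]) = (cs ++ [i]) ++ [x] := by simp [hb]
    rw [h3, ih i x, hb]
    simp

-- foldl-built line equals render of the segment
theorem foldl_join_aux : ∀ (t : List String) (a : String), t ≠ [] →
    t.foldl (fun a e => a ++ " " ++ e) a = a ++ " " ++ PySem.Str.join " " t := by
  intro t
  induction t with
  | nil => intro a h; exact absurd rfl h
  | cons h t' ih =>
    intro a _
    cases t' with
    | nil =>
      simp only [List.foldl_cons, List.foldl_nil, PySem.Str.join, List.map_cons, List.map_nil,
        PySem.Chars.join_singleton, String.ofList_toList]
    | cons h2 t2 =>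
      rw [List.foldl_cons, ih (a ++ " " ++ h) (List.cons_ne_nil h2 t2)]
      simp only [PySem.Str.join, List.map_cons, PySem.Chars.join_cons_cons,
        String.ofList_append, String.ofList_toList]
      simp [String.append_assoc]

theorem renderSeg_eq (strs : List String) (p : Nat × Nat) :
    renderSeg ((strs.drop p.1).take (p.2 - p.1)) = lineStr strs p.1 p.2 := by
  unfold renderSeg lineStr sliceSeg
  by_cases h : (strs.drop p.1).take (p.2 - p.1) = []
  · simp [h]
  · rw [if_neg (by simpa using h), foldl_join_aux _ "" h]
    simp

-- the cut scan reproduces the grouping loop's list of lines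
theorem inv_main (strs : List String) (eol : Int) :
    ∀ (m k : Nat) (cs : List Nat) (i : Nat), i ≤ k → k + m = strs.length →
      (let r := gflLoopB eol (strs.drop k)
          ((pairsOf (cs ++ [i])).map (fun p => lineStr strs p.1 p.2)) (lineStr strs i k)
       r.1 ++ [r.2])
      = (let s := cutsGo eol (gflPre strs) (List.range' k m) (cs ++ [i], preVal strs i)
         (pairsOf (s.1 ++ [strs.length])).map (fun p => lineStr strs p.1 p.2)) := by
  intro m
  induction m with
  | zero =>
    intro k cs i hik hkm
    have hk : k = strs.length := by omega
    subst hk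
    simp only [List.drop_length, gflLoopB, List.range', cutsGo]
    rw [pairs_snoc, List.map_append]
    rfl
  | succ m ih =>
    intro k cs i hik hkm
    have hk : k < strs.length := by omega
    have hdrop : strs.drop k = strs[k] :: strs.drop (k + 1) := List.drop_eq_getElem_cons hk
    have hrange : List.range' k (m + 1) = k :: List.range' (k + 1) m := List.range'_succ
    rw [hdrop, hrange]
    simp only [gflLoopB, cutsGo]
    have hlen : PySem.Str.len (lineStr strs i k) = preVal strs k - preVal strs i :=
      len_lineStr strs i k hik (by omega)
    have hpre1 : (gflPre strs).getD (k + 1) 0 = preVal strs (k + 1) := pre_getD strs (k + 1) (by omega)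
    have hpre0 : (gflPre strs).getD k 0 = preVal strs k := pre_getD strs k (by omega)
    have hsucc : preVal strs (k + 1) = preVal strs k + PySem.Str.len strs[k] + 1 :=
      preVal_succ strs k hk
    by_cases hc : PySem.Str.len (lineStr strs i k) + PySem.Str.len strs[k] > eol
    · rw [if_pos hc, if_pos (by rw [hpre1, hsucc]; omega)]
      have hmap : (pairsOf (cs ++ [i])).map (fun p => lineStr strs p.1 p.2) ++ [lineStr strs i k]
          = (pairsOf ((cs ++ [i]) ++ [k])).map (fun p => lineStr strs p.1 p.2) := by
        rw [pairs_snoc, List.map_append]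
        rfl
      rw [hmap, ← lineStr_single strs k hk, hpre0]
      exact ih (k + 1) (cs ++ [i]) k (by omega) (by omega)
    · rw [if_neg hc, if_neg (by rw [hpre1, hsucc]; omega)]
      rw [← line_snoc strs i k hik hk]
      exact ih (k + 1) cs i (by omega) (by omega)

-- ===== VERDICT (by name: the statement is the Claim_ definition above) =====
theorem generate_file_list_spec : Claim_equal_generate_file_list := by
  intro name elements center line_max _
  unfold Spec_generate_file_list generate_file_list generate_file_list_alt
  have hA := loop_rel center (line_max - (center + 1))
    (name ++ pySpaces (center - PySem.Str.len name) ++ "=") elements.reverse [] ""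
  rw [show PySem.Str.join (" \\\n" ++ pySpaces (center + 1)) ([] : List String) = "" from by
        simp [PySem.Str.join, PySem.Chars.join_nil],
      show (name ++ pySpaces (center - PySem.Str.len name) ++ "=") ++ ""
          = name ++ pySpaces (center - PySem.Str.len name) ++ "=" from by simp] at hA
  simp only [List.isEmpty_nil] at hA
  dsimp only at hA ⊢
  rw [hA]
  have hI := inv_main elements.reverse (line_max - (center + 1)) elements.reverse.length 0 [] 0
    (le_refl 0) (by omega)
  simp only [List.drop_zero, List.nil_append, lineStr_self] at hI
  rw [show pairsOf [0] = [] from rfl, List.map_nil,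
      show preVal elements.reverse 0 = 0 from by simp [preVal]] at hI
  have hmap : List.map (renderSeg ∘ fun p : Nat × Nat => List.take (p.2 - p.1) (List.drop p.1 elements.reverse))
        (pairsOf ((cutsGo (line_max - (center + 1)) (gflPre elements.reverse)
            (List.range' 0 elements.reverse.length) ([0], 0)).1 ++ [elements.reverse.length]))
      = List.map (fun p : Nat × Nat => lineStr elements.reverse p.1 p.2)
        (pairsOf ((cutsGo (line_max - (center + 1)) (gflPre elements.reverse)
            (List.range' 0 elements.reverse.length) ([0], 0)).1 ++ [elements.reverse.length])) :=
    List.map_congr_left (fun p _ => renderSeg_eq elements.reverse p)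
  rw [hI, List.range_eq_range', pairs_zip, List.map_map, hmap]
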